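-- pv_equiv track=rewrite | github.com/minjungsung/Algorithm | 프로그래머스/0/181921. 배열 만들기 2/배열 만들기 2.py | solution
-- ===== SOURCE A (Python) =====
-- def solution(l, r):
--     answer = []
--     for i in range(l, r+1):
--         tempStr = str(i).replace('5','').replace('0','')
--         if (len(tempStr)==0):
--             answer.append(i)
--     if (len(answer)==0):
--         return [-1]
--     return answer
-- ===== SOURCE B (Python) =====
-- def solution(l, r):
--     # Generate the 0/5-digit numbers directly, level by digit-count, instead of scanning [l, r].
--     answer = [0] if l <= 0 <= r else []
--     level = [5]
--     for _ in range(len(str(max(r, 0)))):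
--         answer += [x for x in level if l <= x <= r]
--         level = [10 * x + d for x in level for d in (0, 5)]
--     return answer or [-1]
-- ===== Notes on version B (the rewrite author's own statement) =====
-- stated objective: alternative
-- what changed: Instead of scanning every integer in [l,r] and testing its decimal string, B generates the {0,5}-digit numbers directly, level by digit count, in ascending order and filters them into [l,r] (intended as faster -- O(2^digits(r)) vs O(r-l) -- but a timing run could not confirm it consistently).
import Mathlib
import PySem

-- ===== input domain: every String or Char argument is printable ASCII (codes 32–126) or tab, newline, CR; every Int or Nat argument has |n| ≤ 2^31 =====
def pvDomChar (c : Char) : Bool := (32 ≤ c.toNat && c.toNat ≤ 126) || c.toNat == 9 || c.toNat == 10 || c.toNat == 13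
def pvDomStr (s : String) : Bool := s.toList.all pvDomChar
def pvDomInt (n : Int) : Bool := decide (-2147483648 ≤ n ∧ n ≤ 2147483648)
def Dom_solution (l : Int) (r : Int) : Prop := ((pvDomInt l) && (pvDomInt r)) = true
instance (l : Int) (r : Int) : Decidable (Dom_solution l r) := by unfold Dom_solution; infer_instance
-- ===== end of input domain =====

-- B replaces A's scan of every integer in [l, r] by direct generation of the {0,5}-digit
-- numbers, level by digit count, in ascending order (objective: alternative algorithm).


-- ===== PORT A =====
def solution (l : Int) (r : Int) : List Int :=
  let answer : List Int := []
  let answer := (PySem.List.pyRange l (r+1) 1).foldl (fun answer i =>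
    let tempStr := PySem.Str.replace (PySem.Str.replace (PySem.Int.toStr i) "5" "") "0" ""
    if PySem.Str.len tempStr == 0 then answer ++ [i] else answer) answer
  if answer.length == 0 then [-1] else answer

-- ===== PORT B =====
def solution_alt (l : Int) (r : Int) : List Int :=
  let answer : List Int := if l ≤ 0 ∧ 0 ≤ r then [0] else []
  let st := (PySem.List.pyRange 0 (PySem.Str.len (PySem.Int.toStr (max r 0))) 1).foldl
      (fun (st : List Int × List Int) _ =>
        (st.1 ++ st.2.filter (fun x => decide (l ≤ x) && decide (x ≤ r)),
         st.2.flatMap (fun x => [10 * x + 0, 10 * x + 5])))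
      (answer, [5])
  if st.1 = [] then [-1] else st.1

-- ===== PRECONDITION & SPEC =====
def Spec_solution (l : Int) (r : Int) (out : List Int) : Prop := out = solution_alt l r
instance (l : Int) (r : Int) (out : List Int) : Decidable (Spec_solution l r out) := by unfold Spec_solution; infer_instance

-- ===== CLAIM (what is proved, stated in full; the proofs are below) =====
def Claim_equal_solution : Prop := ∀ (l : Int) (r : Int), Dom_solution l r → Spec_solution l r (solution l r)

-- ===== LEMMAS AND PROOFS =====

-- `n` written in base 10 uses only the digits 0 and 5
def goodB (n : Nat) : Bool := (Nat.digits 10 n).all (fun d => d == 0 || d == 5)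

-- one generation step of B: append a digit 0 or 5 to every number of the level
def stepL (L : List Int) : List Int := L.flatMap (fun x => [10 * x + 0, 10 * x + 5])

-- the k-th level: the {0,5}-digit numbers with k+1 digits, ascending
def lvl : Nat → List Int
  | 0 => [5]
  | k+1 => stepL (lvl k)

-- what B's loop collects in k rounds starting from level L
def collect (l r : Int) : Nat → List Int → List Int
  | 0, _ => []
  | k+1, L => L.filter (fun x => decide (l ≤ x) && decide (x ≤ r)) ++ collect l r k (stepL L)

-- A's per-element test
def pA (i : Int) : Bool :=
  PySem.Str.len (PySem.Str.replace (PySem.Str.replace (PySem.Int.toStr i) "5" "") "0" "") == 0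

-- replacing a single character by "" is filtering it out
lemma replace_go_single (c : Char) :
    ∀ (fuel : Nat) (s acc : List Char), s.length ≤ fuel →
      PySem.Chars.replace.go [c] [] fuel s acc = acc.reverse ++ s.filter (· ≠ c) := by
  intro fuel
  induction fuel with
  | zero => intro s acc h
            have : s = [] := List.eq_nil_of_length_eq_zero (Nat.le_zero.mp h)
            subst this; simp [PySem.Chars.replace.go]
  | succ f ih =>
    intro s acc h
    cases s with
    | nil => simp [PySem.Chars.replace.go]
    | cons a t =>
      simp only [PySem.Chars.replace.go]
      by_cases hac : a = c
      · subst hac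
        have hpre : [a].isPrefixOf (a :: t) = true := by simp [List.isPrefixOf]
        rw [if_pos hpre]
        simp only [List.length_cons, List.length_nil, Nat.zero_add, List.drop_succ_cons,
          List.drop_zero, List.reverse_nil, List.nil_append]
        rw [ih t acc (by simpa using h)]
        simp
      · have hpre : [c].isPrefixOf (a :: t) = false := by
          simp [List.isPrefixOf]; exact fun h' => hac h'.symm
        rw [if_neg (by simp [hpre])]
        rw [ih t _ (by simpa using h)]
        simp [hac]

lemma replace_single (c : Char) (s : List Char) :
    PySem.Chars.replace s [c] [] = s.filter (· ≠ c) := by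
  rw [PySem.Chars.replace]
  simp [replace_go_single c s.length s [] le_rfl]

-- core's decimal printing agrees with `Nat.digits`
lemma toDigitsCore_eq : ∀ (n : Nat) (fuel : Nat) (acc : List Char), 0 < n → n ≤ fuel →
    Nat.toDigitsCore 10 fuel n acc = ((Nat.digits 10 n).map Nat.digitChar).reverse ++ acc := by
  intro n
  induction n using Nat.strong_induction_on with
  | _ n ih =>
    intro fuel acc hn hf
    cases fuel with
    | zero => omega
    | succ f =>
      rw [Nat.toDigitsCore]
      rw [Nat.digits_def' (by norm_num : (1:Nat) < 10) hn]
      by_cases h0 : n / 10 = 0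
      · rw [if_pos h0]
        have : Nat.digits 10 (n / 10) = [] := by rw [h0]; rfl
        simp [this]
      · rw [if_neg h0]
        rw [ih (n / 10) (by omega) f _ (by omega) (by omega)]
        simp

lemma toDigits10 (n : Nat) :
    Nat.toDigits 10 n = if n = 0 then ['0'] else ((Nat.digits 10 n).map Nat.digitChar).reverse := by
  by_cases h : n = 0
  · subst h; rfl
  · rw [if_neg h, Nat.toDigits, toDigitsCore_eq n (n+1) [] (by omega) (by omega)]
    simp

lemma digitChar_five_or_zero {d : Nat} (hd : d < 10) :
    (Nat.digitChar d = '5' ∨ Nat.digitChar d = '0') ↔ (d = 0 ∨ d = 5) := by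
  interval_cases d <;> simp [Nat.digitChar]

-- A's test passes exactly on the nonnegative numbers whose digits are all 0 or 5
lemma pA_iff (i : Int) : pA i = true ↔ 0 ≤ i ∧ goodB i.toNat = true := by
  have h5 : ("5" : String).toList = ['5'] := rfl
  have h0 : ("0" : String).toList = ['0'] := rfl
  have he : ("" : String).toList = [] := rfl
  simp only [pA, beq_iff_eq, PySem.Str.len_eq, PySem.Str.toList_replace, he, h5, h0,
    PySem.Int.toList_toStr, replace_single, Nat.cast_eq_zero, List.length_eq_zero_iff,
    List.filter_filter, List.filter_eq_nil_iff]
  rw [PySem.Int.toChars]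
  by_cases hneg : i < 0
  · rw [if_pos hneg]
    constructor
    · intro h; exact absurd (h '-' (by simp)) (by decide)
    · intro h; omega
  · rw [if_neg hneg]
    rw [toDigits10]
    by_cases hz : i.toNat = 0
    · rw [if_pos hz]
      constructor
      · intro _; exact ⟨by omega, by rw [hz]; rfl⟩
      · intro _ c hc; simp at hc; subst hc; decide
    · rw [if_neg hz]
      simp only [List.mem_reverse, List.mem_map, goodB, List.all_eq_true]
      constructor
      · rintro h
        refine ⟨by omega, ?_⟩
        intro d hd
        have hlt : d < 10 := Nat.digits_lt_base (by norm_num) hd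
        have h2 := h (Nat.digitChar d) ⟨d, hd, rfl⟩
        simp only [Bool.and_eq_true, decide_eq_true_eq, not_and, ne_eq, not_not] at h2
        have : Nat.digitChar d = '5' ∨ Nat.digitChar d = '0' := by tauto
        have := (digitChar_five_or_zero hlt).mp this
        simp only [beq_iff_eq, Bool.or_eq_true]
        tauto
      · rintro ⟨_, h⟩ c ⟨d, hd, hdc⟩
        subst hdc
        have hlt : d < 10 := Nat.digits_lt_base (by norm_num) hd
        have h2 := h d hd
        simp only [Bool.or_eq_true, beq_iff_eq] at h2
        have : Nat.digitChar d = '5' ∨ Nat.digitChar d = '0' := (digitChar_five_or_zero hlt).mpr (by tauto)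
        simp only [Bool.and_eq_true, decide_eq_true_eq, not_and, ne_eq, not_not]
        tauto

lemma goodB_mul10_add (m d : Nat) (hm : 0 < m) (hd : d < 10) :
    goodB (10 * m + d) = true ↔ (d = 0 ∨ d = 5) ∧ goodB m = true := by
  have h1 : (10 * m + d) % 10 = d := by omega
  have h2 : (10 * m + d) / 10 = m := by omega
  rw [goodB, Nat.digits_def' (by norm_num : (1:Nat) < 10) (by omega), h1, h2]
  simp [goodB]

lemma mem_lvl : ∀ (k : Nat) (x : Int), x ∈ lvl k ↔
    ∃ n : Nat, x = (n : Int) ∧ goodB n = true ∧ 5 * 10 ^ k ≤ n ∧ n < 10 ^ (k+1) := by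
  intro k
  induction k with
  | zero =>
    intro x
    constructor
    · intro hx; simp [lvl] at hx; subst hx
      exact ⟨5, rfl, by decide, by norm_num, by norm_num⟩
    · rintro ⟨n, rfl, hg, hlo, hhi⟩
      have hn0 : 0 < n := by omega
      have : Nat.digits 10 n = [n] := by
        rw [Nat.digits_def' (by norm_num : (1:Nat) < 10) hn0]
        simp [Nat.mod_eq_of_lt (by omega : n < 10), Nat.div_eq_of_lt (by omega : n < 10)]
      rw [goodB, this] at hg
      simp at hg
      have : n = 5 := by omega
      subst this; simp [lvl]
  | succ k ih =>
    intro x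
    constructor
    · intro hx
      simp only [lvl, stepL, List.mem_flatMap, List.mem_cons, List.not_mem_nil, or_false] at hx
      obtain ⟨y, hy, hx⟩ := hx
      obtain ⟨n, rfl, hg, hlo, hhi⟩ := (ih y).mp hy
      have hQ : 0 < 10 ^ k := by positivity
      have hn0 : 0 < n := by omega
      rcases hx with rfl | rfl
      · refine ⟨10 * n + 0, by push_cast; ring, ?_, ?_, ?_⟩
        · exact (goodB_mul10_add n 0 hn0 (by norm_num)).mpr ⟨Or.inl rfl, hg⟩
        · rw [pow_succ]; omega
        · rw [pow_succ, pow_succ]; rw [pow_succ] at hhi; omega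
      · refine ⟨10 * n + 5, by push_cast; ring, ?_, ?_, ?_⟩
        · exact (goodB_mul10_add n 5 hn0 (by norm_num)).mpr ⟨Or.inr rfl, hg⟩
        · rw [pow_succ]; omega
        · rw [pow_succ, pow_succ]; rw [pow_succ] at hhi; omega
    · rintro ⟨n, rfl, hg, hlo, hhi⟩
      have h50 : 5 * 10 ^ (k+1) = 50 * 10 ^ k := by ring
      have h100 : 10 ^ (k+1+1) = 100 * 10 ^ k := by ring
      have hQ : 0 < 10 ^ k := by positivity
      obtain ⟨m, d, hnd, hd10⟩ : ∃ m d, n = 10 * m + d ∧ d < 10 := ⟨n / 10, n % 10, by omega, by omega⟩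
      have hm0 : 0 < m := by
        rw [h50] at hlo; omega
      have := (goodB_mul10_add m d hm0 hd10).mp (by rw [← hnd]; exact hg)
      obtain ⟨hd05, hgm⟩ := this
      have hmlo : 5 * 10 ^ k ≤ m := by rw [h50] at hlo; omega
      have hmhi : m < 10 ^ (k+1) := by rw [h100] at hhi; rw [pow_succ]; omega
      simp only [lvl, stepL, List.mem_flatMap, List.mem_cons, List.not_mem_nil, or_false]
      refine ⟨(m : Int), (ih _).mpr ⟨m, rfl, hgm, hmlo, hmhi⟩, ?_⟩
      rcases hd05 with rfl | rfl
      · exact Or.inl (by push_cast [hnd]; ring)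
      · exact Or.inr (by push_cast [hnd]; ring)

lemma lvl_pairwise : ∀ k : Nat, (lvl k).Pairwise (· < ·) := by
  intro k
  induction k with
  | zero => simp [lvl]
  | succ k ih =>
    rw [lvl, stepL]
    apply List.pairwise_flatMap.mpr
    constructor
    · intro a _; simp
    · apply ih.imp
      intro a b hab
      simp only [List.mem_cons, List.not_mem_nil, or_false]
      rintro x (rfl | rfl) y (rfl | rfl) <;> omega

lemma mem_collect (l r : Int) : ∀ (k j : Nat) (x : Int), x ∈ collect l r k (lvl j) ↔
    ∃ m : Nat, m < k ∧ x ∈ lvl (j+m) ∧ l ≤ x ∧ x ≤ r := by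
  intro k
  induction k with
  | zero => intro j x; simp [collect]
  | succ k ih =>
    intro j x
    have hstep : stepL (lvl j) = lvl (j+1) := rfl
    rw [collect, hstep, List.mem_append, List.mem_filter, ih (j+1) x]
    constructor
    · rintro (⟨hm, hp⟩ | ⟨m, hm, hx, hlr⟩)
      · simp only [Bool.and_eq_true, decide_eq_true_eq] at hp
        exact ⟨0, by omega, by simpa using hm, hp⟩
      · exact ⟨m+1, by omega, by rw [show j+(m+1) = j+1+m by omega]; exact hx, hlr⟩
    · rintro ⟨m, hm, hx, hlr⟩
      cases m with
      | zero => left; exact ⟨by simpa using hx, by simp [hlr.1, hlr.2]⟩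
      | succ m => right; exact ⟨m, by omega, by rw [show j+1+m = j+(m+1) by omega]; exact hx, hlr⟩

lemma lvl_bounds {j : Nat} {x : Int} (hx : x ∈ lvl j) :
    5 * 10 ^ j ≤ x ∧ x < 10 ^ (j+1) := by
  obtain ⟨n, rfl, -, hlo, hhi⟩ := (mem_lvl j x).mp hx
  constructor <;> exact_mod_cast ‹_›

lemma collect_pairwise (l r : Int) : ∀ (k j : Nat), (collect l r k (lvl j)).Pairwise (· < ·) := by
  intro k
  induction k with
  | zero => intro j; simp [collect]
  | succ k ih =>
    intro j
    have hstep : stepL (lvl j) = lvl (j+1) := rfl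
    rw [collect, hstep]
    apply List.pairwise_append.mpr
    refine ⟨(lvl_pairwise j).filter _, ih (j+1), ?_⟩
    intro x hx y hy
    have hx' := (lvl_bounds (List.mem_of_mem_filter hx)).2
    obtain ⟨m, -, hy', -, -⟩ := (mem_collect l r k (j+1) y).mp hy
    have hy'' := (lvl_bounds hy').1
    have hd : (0:Int) < 10 ^ (j+1+m) := by positivity
    have h1 : (10:Int) ^ (j+1) ≤ 5 * 10 ^ (j+1+m) := by
      have h2 : (10:Int) ^ (j+1) ≤ 10 ^ (j+1+m) := by
        apply pow_le_pow_right₀ (by norm_num); omega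
      omega
    omega

-- a {0,5}-digit number has leading digit 5
lemma good_lower (n : Nat) (hn : n ≠ 0) (hg : goodB n = true) :
    5 * 10 ^ ((Nat.digits 10 n).length - 1) ≤ n := by
  have hne : Nat.digits 10 n ≠ [] := Nat.digits_ne_nil_iff_ne_zero.mpr hn
  have hlast5 : (Nat.digits 10 n).getLast hne = 5 := by
    have hmem := List.getLast_mem hne
    have := (List.all_eq_true.mp hg) _ hmem
    have hnz : (Nat.digits 10 n).getLast hne ≠ 0 := Nat.getLast_digit_ne_zero 10 hn
    simp only [Bool.or_eq_true, beq_iff_eq] at this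
    omega
  have hsplit := List.dropLast_append_getLast hne
  have := Nat.ofDigits_digits 10 n
  rw [← hsplit, Nat.ofDigits_append, hlast5] at this
  have hlen : (Nat.digits 10 n).dropLast.length = (Nat.digits 10 n).length - 1 := by simp
  rw [hlen] at this
  simp [Nat.ofDigits_singleton] at this
  omega

-- what B's loop computes
lemma foldlB (l r : Int) : ∀ (ms : List Int) (ans L : List Int),
    ms.foldl (fun (st : List Int × List Int) _ =>
        (st.1 ++ st.2.filter (fun x => decide (l ≤ x) && decide (x ≤ r)),
         st.2.flatMap (fun x => [10 * x + 0, 10 * x + 5]))) (ans, L)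
      = (ans ++ collect l r ms.length L, stepL^[ms.length] L) := by
  intro ms
  induction ms with
  | nil => intro ans L; simp [collect]
  | cons m ms ih =>
    intro ans L
    rw [List.foldl_cons, ih]
    rw [List.length_cons, collect]
    simp [stepL, Function.iterate_succ_apply, List.append_assoc]

lemma eq_of_pairwise_lt_of_mem_iff (xs ys : List Int)
    (hx : xs.Pairwise (· < ·)) (hy : ys.Pairwise (· < ·))
    (h : ∀ a, a ∈ xs ↔ a ∈ ys) : xs = ys := by
  have hnx : xs.Nodup := hx.imp ne_of_lt
  have hny : ys.Nodup := hy.imp ne_of_lt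
  have hperm : xs.Perm ys := (List.perm_ext_iff_of_nodup hnx hny).mpr h
  exact hperm.eq_of_pairwise (fun a b _ _ h1 h2 => absurd h2 (by omega)) hx hy

-- the two answer lists agree: both are the sorted {0,5}-digit numbers in [l, r]
lemma main_list_eq (l r : Int) :
    (PySem.List.pyRange l (r+1) 1).filter pA
      = (if l ≤ 0 ∧ 0 ≤ r then [0] else [])
        ++ collect l r (PySem.Int.toChars (max r 0)).length (lvl 0) := by
  apply eq_of_pairwise_lt_of_mem_iff
  · exact (PySem.List.pairwise_lt_pyRange_one l (r+1)).filter _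
  · apply List.pairwise_append.mpr
    refine ⟨?_, collect_pairwise l r _ 0, ?_⟩
    · split_ifs <;> simp
    · intro x hx y hy
      have hx0 : x = 0 := by split_ifs at hx <;> simp_all
      obtain ⟨m, -, hy', -, -⟩ := (mem_collect l r _ 0 y).mp hy
      have := (lvl_bounds hy').1
      have hp : (0:Int) < 10 ^ (0+m) := by positivity
      omega
  · intro a
    rw [List.mem_filter, PySem.List.mem_pyRange_one, List.mem_append]
    constructor
    · rintro ⟨⟨hla, har⟩, hpa⟩
      obtain ⟨ha0, hg⟩ := (pA_iff a).mp hpa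
      by_cases haz : a = 0
      · subst haz; left; split_ifs with h
        · simp
        · exact absurd ⟨hla, by omega⟩ h
      · right
        have hn0 : a.toNat ≠ 0 := by omega
        have hlen1 : 1 ≤ (Nat.digits 10 a.toNat).length := by
          have hne : Nat.digits 10 a.toNat ≠ [] := (Nat.digits_ne_nil_iff_ne_zero (b := 10)).mpr hn0
          cases h : Nat.digits 10 a.toNat with
          | nil => exact absurd h hne
          | cons d t => simp
        have hrpos : 0 < r := by
          rcases lt_or_ge 0 r with h | h
          · exact h
          · exfalso; omega
        have hmax : max r 0 = r := by omega
        have hD : (PySem.Int.toChars (max r 0)).length = (Nat.digits 10 r.toNat).length := by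
          rw [hmax, PySem.Int.toChars, if_neg (by omega), toDigits10,
            if_neg (by omega)]
          simp
        refine (mem_collect l r _ 0 a).mpr
          ⟨(Nat.digits 10 a.toNat).length - 1, ?_, ?_, hla, by omega⟩
        · rw [hD]
          have hmono : (Nat.digits 10 a.toNat).length ≤ (Nat.digits 10 r.toNat).length :=
            Nat.le_length_digits_le 10 _ _ (by omega)
          omega
        · rw [Nat.zero_add]
          refine (mem_lvl _ a).mpr ⟨a.toNat, by omega, hg, good_lower _ hn0 hg, ?_⟩
          rw [Nat.sub_add_cancel hlen1]
          exact Nat.lt_base_pow_length_digits (by norm_num)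
    · rintro (h0 | hc)
      · have : a = 0 ∧ l ≤ 0 ∧ 0 ≤ r := by split_ifs at h0 with h <;> simp_all
        obtain ⟨rfl, h1, h2⟩ := this
        exact ⟨⟨h1, by omega⟩, (pA_iff 0).mpr ⟨le_rfl, by decide⟩⟩
      · obtain ⟨m, -, hl', hla, har⟩ := (mem_collect l r _ 0 a).mp hc
        obtain ⟨n, rfl, hg, -, -⟩ := (mem_lvl _ a).mp hl'
        exact ⟨⟨hla, by omega⟩, (pA_iff _).mpr ⟨by positivity, by simpa using hg⟩⟩

-- ===== VERDICT (by name: the statement is the Claim_ definition above) =====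
theorem solution_spec : Claim_equal_solution := by
  intro l r _
  show solution l r = solution_alt l r
  have hA : solution l r =
      if ((PySem.List.pyRange l (r+1) 1).filter pA).length == 0 then [-1]
      else (PySem.List.pyRange l (r+1) 1).filter pA := by
    rw [solution]
    rw [show (fun (answer : List Int) (i : Int) =>
        let tempStr := PySem.Str.replace (PySem.Str.replace (PySem.Int.toStr i) "5" "") "0" ""
        if PySem.Str.len tempStr == 0 then answer ++ [i] else answer)
      = (fun (acc : List Int) (x : Int) => if pA x = true then acc ++ [(fun y => y) x] else acc) from rfl]
    rw [PySem.List.foldl_append_if pA (fun y => y)]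
    simp
  have hB : solution_alt l r =
      if ((if l ≤ 0 ∧ 0 ≤ r then ([0] : List Int) else [])
          ++ collect l r (PySem.Int.toChars (max r 0)).length (lvl 0)) = [] then [-1]
      else (if l ≤ 0 ∧ 0 ≤ r then ([0] : List Int) else [])
          ++ collect l r (PySem.Int.toChars (max r 0)).length (lvl 0) := by
    rw [solution_alt]
    rw [foldlB l r]
    have hlen : (PySem.List.pyRange 0 (PySem.Str.len (PySem.Int.toStr (max r 0))) 1).length
        = (PySem.Int.toChars (max r 0)).length := by
      rw [PySem.List.length_pyRange_one]
      simp [PySem.Str.len_eq, PySem.Int.toList_toStr]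
    rw [hlen]
    rfl
  rw [hA, hB, main_list_eq l r]
  split_ifs with h1 h2 h2 <;> simp_all
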